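-- pv_equiv track=rewrite | github.com/divyanshsinghk/speech-to-isl-avatar-MajorProject | backend/nlp_processing/isl_grammar.py | apply_isl_grammar
-- ===== SOURCE A (Python) =====
-- def apply_isl_grammar(tokens):
--     subjects = []
--     objects = []
--     verbs = []
--
--     SUBJECTS = {"I", "YOU", "HE", "SHE", "WE", "THEY"}
--
--     for token in tokens:
--         if token in SUBJECTS:
--             subjects.append(token)
--         elif token.endswith("E") or token.endswith("ING"):
--             verbs.append(token)
--         else:
--             objects.append(token)
--
--     return subjects + objects + verbs
-- ===== SOURCE B (Python) =====
-- def apply_isl_grammar(tokens):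
--     SUBJECTS = {"I", "YOU", "HE", "SHE", "WE", "THEY"}
--     subjects = [t for t in tokens if t in SUBJECTS]
--     verbs = [t for t in tokens
--              if t not in SUBJECTS and (t.endswith("E") or t.endswith("ING"))]
--     objects = [t for t in tokens
--                if t not in SUBJECTS and not t.endswith("E") and not t.endswith("ING")]
--     return subjects + objects + verbs
-- ===== Notes on version B (the rewrite author's own statement) =====
-- stated objective: alternative
-- what changed: Replaces the single classify-and-dispatch loop maintaining three mutable buckets by three independent filtering passes over tokens, concatenated directly.
import Mathlib
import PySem

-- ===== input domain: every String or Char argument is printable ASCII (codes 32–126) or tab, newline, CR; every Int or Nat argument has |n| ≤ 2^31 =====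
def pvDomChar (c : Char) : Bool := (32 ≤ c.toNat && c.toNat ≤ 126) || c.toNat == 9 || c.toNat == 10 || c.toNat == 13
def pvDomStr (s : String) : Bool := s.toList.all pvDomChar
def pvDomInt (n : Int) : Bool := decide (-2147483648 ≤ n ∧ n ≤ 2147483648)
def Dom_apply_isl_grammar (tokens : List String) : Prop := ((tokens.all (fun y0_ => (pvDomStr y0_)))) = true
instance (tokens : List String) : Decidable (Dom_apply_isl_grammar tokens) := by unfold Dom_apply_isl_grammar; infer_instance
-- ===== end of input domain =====

-- B restructures A's single classify-and-dispatch loop into three independent filtering passes (alternative decomposition, same cost).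

-- ===== PORT A =====
-- the SUBJECTS set literal
def islSubjects : PySem.Set String := PySem.Set.ofList ["I", "YOU", "HE", "SHE", "WE", "THEY"]

-- A's single loop: three accumulators, one append per token
def apply_isl_grammar (tokens : List String) : List String :=
  let r := tokens.foldl
    (fun (acc : List String × List String × List String) token =>
      if PySem.Set.contains islSubjects token then
        (acc.1 ++ [token], acc.2.1, acc.2.2)
      else if PySem.Str.endswith token "E" || PySem.Str.endswith token "ING" then
        (acc.1, acc.2.1, acc.2.2 ++ [token])
      else
        (acc.1, acc.2.1 ++ [token], acc.2.2))
    ([], [], [])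
  r.1 ++ r.2.1 ++ r.2.2

-- ===== PORT B =====
-- B: three independent filters over tokens, concatenated
def apply_isl_grammar_alt (tokens : List String) : List String :=
  let SUBJECTS : PySem.Set String := PySem.Set.ofList ["I", "YOU", "HE", "SHE", "WE", "THEY"]
  let subjects := tokens.filter (fun t => PySem.Set.contains SUBJECTS t)
  let verbs := tokens.filter (fun t =>
    !PySem.Set.contains SUBJECTS t && (PySem.Str.endswith t "E" || PySem.Str.endswith t "ING"))
  let objects := tokens.filter (fun t =>
    !PySem.Set.contains SUBJECTS t && !PySem.Str.endswith t "E" && !PySem.Str.endswith t "ING")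
  subjects ++ objects ++ verbs

-- ===== PRECONDITION & SPEC =====
def Spec_apply_isl_grammar (tokens : List String) (out : List String) : Prop := out = apply_isl_grammar_alt tokens
instance (tokens : List String) (out : List String) : Decidable (Spec_apply_isl_grammar tokens out) := by unfold Spec_apply_isl_grammar; infer_instance

-- ===== CLAIM (what is proved, stated in full; the proofs are below) =====
def Claim_equal_apply_isl_grammar : Prop := ∀ (tokens : List String), Dom_apply_isl_grammar tokens → Spec_apply_isl_grammar tokens (apply_isl_grammar tokens)

-- ===== LEMMAS AND PROOFS =====

-- loop invariant: A's fold extends each accumulator by the corresponding filter of the remaining tokens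
theorem isl_fold_eq (ts : List String) (s o v : List String) :
    ts.foldl
      (fun (acc : List String × List String × List String) token =>
        if PySem.Set.contains islSubjects token then
          (acc.1 ++ [token], acc.2.1, acc.2.2)
        else if PySem.Str.endswith token "E" || PySem.Str.endswith token "ING" then
          (acc.1, acc.2.1, acc.2.2 ++ [token])
        else
          (acc.1, acc.2.1 ++ [token], acc.2.2))
      (s, o, v)
    = (s ++ ts.filter (fun t => PySem.Set.contains islSubjects t),
       o ++ ts.filter (fun t =>
         !PySem.Set.contains islSubjects t && !PySem.Str.endswith t "E" && !PySem.Str.endswith t "ING"),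
       v ++ ts.filter (fun t =>
         !PySem.Set.contains islSubjects t && (PySem.Str.endswith t "E" || PySem.Str.endswith t "ING"))) := by
  induction ts generalizing s o v with
  | nil => simp
  | cons t ts ih =>
    simp at ih
    by_cases hs : t ∈ islSubjects
    · simp [List.foldl_cons, hs, ih]
    · by_cases hE : PySem.Chars.endswith t.toList ['E'] = true
      · simp [List.foldl_cons, hs, hE, ih]
      · by_cases hG : PySem.Chars.endswith t.toList ['I','N','G'] = true
        · simp [List.foldl_cons, hs, hE, hG, ih]
        · simp [List.foldl_cons, hs, hE, hG, ih]

-- ===== VERDICT (by name: the statement is the Claim_ definition above) =====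
theorem apply_isl_grammar_spec : Claim_equal_apply_isl_grammar := by
  intro tokens _
  unfold Spec_apply_isl_grammar apply_isl_grammar apply_isl_grammar_alt
  rw [isl_fold_eq]
  simp [islSubjects]
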